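-- pv_equiv track=rewrite | github.com/peppone-choi/openlogh | backend/scripts/mdx_to_gltf.py | decode_faces
-- ===== SOURCE A (Python) =====
-- def decode_faces(indices, vc, is_strip):
--     """Decode index buffer to face list."""
--     faces = []
--     if is_strip:
--         buf = []
--         for v in indices:
--             if v == -1 or v >= vc:
--                 buf = []
--                 continue
--             buf.append(v)
--             if len(buf) >= 3:
--                 i0, i1, i2 = buf[-3], buf[-2], buf[-1]
--                 if i0 != i1 and i1 != i2 and i0 != i2:
--                     idx = len(buf) - 3
--                     if idx % 2 == 0:
--                         faces.append([i0, i1, i2])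
--                     else:
--                         faces.append([i0, i2, i1])
--     else:
--         clean = [v for v in indices if v >= 0 and v < vc]
--         for i in range(0, len(clean) - 2, 3):
--             i0, i1, i2 = clean[i], clean[i+1], clean[i+2]
--             if i0 != i1 and i1 != i2 and i0 != i2:
--                 faces.append([i0, i1, i2])
--     return faces
-- ===== SOURCE B (Python) =====
-- def decode_faces(indices, vc, is_strip):
--     """Decode index buffer to face list.
--
--     Two-pass decomposition: first split the indices into runs (strip) or one
--     cleaned run (list), then emit triangles from the runs in a second pass.
--     """
--     if is_strip:
--         runs = [[]]
--         for v in indices: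
--             if v == -1 or v >= vc:
--                 runs.append([])
--             else:
--                 runs[-1].append(v)
--         faces = []
--         for run in runs:
--             for k, (i0, i1, i2) in enumerate(zip(run, run[1:], run[2:])):
--                 if i0 != i1 and i1 != i2 and i0 != i2:
--                     faces.append([i0, i1, i2] if k % 2 == 0 else [i0, i2, i1])
--         return faces
--     else:
--         rest = [v for v in indices if 0 <= v < vc]
--         faces = []
--         while len(rest) >= 3:
--             i0, i1, i2, rest = rest[0], rest[1], rest[2], rest[3:]
--             if i0 != i1 and i1 != i2 and i0 != i2:
--                 faces.append([i0, i1, i2])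
--         return faces
-- ===== Notes on version B (the rewrite author's own statement) =====
-- stated objective: alternative
-- what changed: B decodes in two passes: it first materialises explicit runs (segments split at strip separators, or one cleaned run for the list case) and then emits triangles from the runs (a sliding 3-window with parity winding per run, or chunk-of-3 consumption), instead of A's single stateful loop that buffers and emits as it scans.
import Mathlib
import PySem

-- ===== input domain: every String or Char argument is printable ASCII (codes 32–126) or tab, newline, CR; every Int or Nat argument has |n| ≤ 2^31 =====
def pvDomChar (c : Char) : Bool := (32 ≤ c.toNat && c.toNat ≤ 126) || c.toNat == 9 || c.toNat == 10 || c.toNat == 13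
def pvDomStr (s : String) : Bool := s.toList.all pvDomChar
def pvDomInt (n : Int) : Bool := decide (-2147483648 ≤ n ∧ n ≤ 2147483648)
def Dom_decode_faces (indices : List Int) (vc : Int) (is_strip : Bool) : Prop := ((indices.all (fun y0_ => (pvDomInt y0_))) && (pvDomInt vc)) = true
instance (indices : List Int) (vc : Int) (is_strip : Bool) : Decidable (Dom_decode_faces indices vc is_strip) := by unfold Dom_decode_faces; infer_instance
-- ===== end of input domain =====

-- B replaces A's single stateful buffer loop by a two-pass decomposition (split into runs, then emit triangles per run); same O(n) cost ("alternative").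

-- ===== PORT A =====
-- one iteration of A's strip loop, state = (buf, faces)
def aStripStep (vc : Int) (st : List Int × List (List Int)) (v : Int) : List Int × List (List Int) :=
  if v = -1 ∨ v ≥ vc then (([] : List Int), st.2)
  else
    let buf := st.1 ++ [v]
    if buf.length ≥ 3 then
      -- i0, i1, i2 = buf[-3], buf[-2], buf[-1]
      let i0 := PySem.List.pyGetD buf (-3) 0
      let i1 := PySem.List.pyGetD buf (-2) 0
      let i2 := PySem.List.pyGetD buf (-1) 0
      if i0 ≠ i1 ∧ i1 ≠ i2 ∧ i0 ≠ i2 then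
        let idx := buf.length - 3
        if idx % 2 = 0 then (buf, st.2 ++ [[i0, i1, i2]])
        else (buf, st.2 ++ [[i0, i2, i1]])
      else (buf, st.2)
    else (buf, st.2)

def decode_faces (indices : List Int) (vc : Int) (is_strip : Bool) : List (List Int) :=
  if is_strip then
    (indices.foldl (aStripStep vc) (([] : List Int), ([] : List (List Int)))).2
  else
    let clean := indices.filter (fun v => decide (0 ≤ v ∧ v < vc))
    -- for i in range(0, len(clean) - 2, 3)
    (PySem.List.pyRange 0 ((clean.length : Int) - 2) 3).foldl
      (fun faces i =>
        let i0 := PySem.List.pyGetD clean i 0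
        let i1 := PySem.List.pyGetD clean (i + 1) 0
        let i2 := PySem.List.pyGetD clean (i + 2) 0
        if i0 ≠ i1 ∧ i1 ≠ i2 ∧ i0 ≠ i2 then faces ++ [[i0, i1, i2]] else faces)
      ([] : List (List Int))

-- ===== PORT B =====
-- triangle (possibly none) emitted by the 3-window at position k of its run
def triAt (k : Nat) (i0 i1 i2 : Int) : List (List Int) :=
  if i0 ≠ i1 ∧ i1 ≠ i2 ∧ i0 ≠ i2 then
    [if k % 2 = 0 then [i0, i1, i2] else [i0, i2, i1]]
  else []

-- 'for k, (i0,i1,i2) in enumerate(zip(run, run[1:], run[2:]))': slide a 3-window over the run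
def emitRun (k : Nat) : List Int → List (List Int)
  | i0 :: i1 :: i2 :: rest => triAt k i0 i1 i2 ++ emitRun (k + 1) (i1 :: i2 :: rest)
  | _ => []

-- pass 1 of the strip case: split at separators ('runs.append([])' / 'runs[-1].append(v)')
def bRunStep (vc : Int) (runs : List (List Int)) (v : Int) : List (List Int) :=
  if v = -1 ∨ v ≥ vc then runs ++ [[]]
  else runs.dropLast ++ [runs.getLastD [] ++ [v]]

-- 'while len(rest) >= 3:' consume a 3-chunk each time
def emitList : List Int → List (List Int)
  | i0 :: i1 :: i2 :: rest =>
      (if i0 ≠ i1 ∧ i1 ≠ i2 ∧ i0 ≠ i2 then [[i0, i1, i2]] else []) ++ emitList rest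
  | _ => []

def decode_faces_alt (indices : List Int) (vc : Int) (is_strip : Bool) : List (List Int) :=
  if is_strip then
    ((indices.foldl (bRunStep vc) [[]]).map (emitRun 0)).flatten
  else
    emitList (indices.filter (fun v => decide (0 ≤ v ∧ v < vc)))

-- ===== PRECONDITION & SPEC =====
def Spec_decode_faces (indices : List Int) (vc : Int) (is_strip : Bool) (out : List (List Int)) : Prop := out = decode_faces_alt indices vc is_strip
instance (indices : List Int) (vc : Int) (is_strip : Bool) (out : List (List Int)) : Decidable (Spec_decode_faces indices vc is_strip out) := by unfold Spec_decode_faces; infer_instance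

-- ===== CLAIM (what is proved, stated in full; the proofs are below) =====
def Claim_equal_decode_faces : Prop := ∀ (indices : List Int) (vc : Int) (is_strip : Bool), Dom_decode_faces indices vc is_strip → Spec_decode_faces indices vc is_strip (decode_faces indices vc is_strip)

-- ===== LEMMAS AND PROOFS =====

theorem emitRun_short (k : Nat) (l : List Int) (h : l.length < 3) : emitRun k l = [] := by
  match l with
  | [] => rfl
  | [_] => rfl
  | [_, _] => rfl
  | _ :: _ :: _ :: _ => simp at h; omega

theorem eq_nil_or_concat' {α : Type} (l : List α) : l = [] ∨ ∃ L b, l = L ++ [b] := by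
  induction l with
  | nil => exact Or.inl rfl
  | cons x xs ih =>
    rcases ih with rfl | ⟨L, b, rfl⟩
    · exact Or.inr ⟨[], x, rfl⟩
    · exact Or.inr ⟨x :: L, b, rfl⟩

theorem exists_concat {α : Type} {l : List α} (h : l ≠ []) : ∃ L b, l = L ++ [b] := by
  rcases eq_nil_or_concat' l with rfl | hc
  · exact absurd rfl h
  · exact hc

theorem emitRun_snoc (l : List Int) (a b v : Int) : ∀ (k : Nat),
    emitRun k (l ++ [a, b, v]) = emitRun k (l ++ [a, b]) ++ triAt (k + l.length) a b v := by
  induction l with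
  | nil => intro k; simp [emitRun]
  | cons x l' ih =>
    intro k
    match l' with
    | [] => simp [emitRun]
    | [y] =>
      have h := ih (k + 1)
      simp only [List.cons_append, List.nil_append, emitRun] at h ⊢
      rw [h]; simp; try ring_nf
    | y :: z :: l'' =>
      have h := ih (k + 1)
      simp only [List.cons_append, emitRun] at h ⊢
      rw [h]; simp; try ring_nf

theorem foldl_bRunStep_append (vc : Int) (indices : List Int) : ∀ (rs l : List (List Int)), l ≠ [] →
    (indices.foldl (bRunStep vc) (rs ++ l)) = rs ++ indices.foldl (bRunStep vc) l := by
  induction indices with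
  | nil => intro rs l h; rfl
  | cons v rest ih =>
    intro rs l h
    simp only [List.foldl_cons]
    by_cases hs : v = -1 ∨ v ≥ vc
    · rw [show bRunStep vc (rs ++ l) v = rs ++ (l ++ [[]]) by simp [bRunStep, hs],
        show bRunStep vc l v = l ++ [[]] by simp [bRunStep, hs]]
      exact ih rs (l ++ [[]]) (by simp)
    · obtain ⟨l', last, rfl⟩ := exists_concat h
      rw [show bRunStep vc (rs ++ (l' ++ [last])) v = rs ++ (l' ++ [last ++ [v]]) by
            simp [bRunStep, hs, ← List.append_assoc],
        show bRunStep vc (l' ++ [last]) v = l' ++ [last ++ [v]] by simp [bRunStep, hs]]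
      exact ih rs (l' ++ [last ++ [v]]) (by simp)

theorem exists_snoc2 {r : List Int} (h : 2 ≤ r.length) : ∃ l a b, r = l ++ [a, b] := by
  have hr : r ≠ [] := by intro hx; rw [hx] at h; simp at h
  obtain ⟨l1, b, rfl⟩ := exists_concat hr
  have hl1 : l1 ≠ [] := by intro hx; rw [hx] at h; simp at h
  obtain ⟨l2, a, rfl⟩ := exists_concat hl1
  exact ⟨l2, a, b, by simp⟩

theorem emitRun_snoc_prefix (r : List Int) (v : Int) :
    ∃ d, emitRun 0 (r ++ [v]) = emitRun 0 r ++ d := by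
  by_cases h : 2 ≤ r.length
  · obtain ⟨l, a, b, rfl⟩ := exists_snoc2 h
    exact ⟨_, by simpa using emitRun_snoc l a b v 0⟩
  · exact ⟨emitRun 0 (r ++ [v]), by rw [emitRun_short 0 r (by omega)]; rfl⟩

theorem emit_prefix (vc : Int) : ∀ (rest : List Int) (r : List Int),
    ∃ Y, (((rest.foldl (bRunStep vc) [r]).map (emitRun 0)).flatten) = emitRun 0 r ++ Y := by
  intro rest
  induction rest with
  | nil => intro r; exact ⟨[], by simp⟩
  | cons v rest ih =>
    intro r
    simp only [List.foldl_cons]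
    by_cases hs : v = -1 ∨ v ≥ vc
    · rw [show bRunStep vc [r] v = [r] ++ [[]] by simp [bRunStep, hs],
        foldl_bRunStep_append vc rest [r] [[]] (by simp)]
      refine ⟨((rest.foldl (bRunStep vc) [[]]).map (emitRun 0)).flatten, by simp⟩
    · rw [show bRunStep vc [r] v = [r ++ [v]] by simp [bRunStep, hs]]
      obtain ⟨Y, hY⟩ := ih (r ++ [v])
      obtain ⟨d, hd⟩ := emitRun_snoc_prefix r v
      exact ⟨d ++ Y, by rw [hY, hd, List.append_assoc]⟩

theorem pyGetD_snoc3_a (l : List Int) (a b v : Int) :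
    PySem.List.pyGetD (l ++ [a, b, v]) (-3) 0 = a := by
  rw [PySem.List.pyGetD_neg_ofNat (l ++ [a, b, v]) 3 0 (by omega) (by simp)]
  simp [List.getElem_append_right]

theorem pyGetD_snoc3_b (l : List Int) (a b v : Int) :
    PySem.List.pyGetD (l ++ [a, b, v]) (-2) 0 = b := by
  have h1 : l ++ [a, b, v] = (l ++ [a]) ++ [b, v] := by simp
  rw [h1, PySem.List.pyGetD_neg_ofNat ((l ++ [a]) ++ [b, v]) 2 0 (by omega) (by simp)]
  simp [List.getElem_append_right]

theorem pyGetD_snoc3_v (l : List Int) (a b v : Int) :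
    PySem.List.pyGetD (l ++ [a, b, v]) (-1) 0 = v := by
  rw [show l ++ [a, b, v] = (l ++ [a, b]) ++ [v] by simp]
  exact PySem.List.pyGetD_neg_one_append_singleton _ _ _

-- A's step on a non-separator appends exactly the new 3-window triangle of emitRun
theorem aStripStep_nonsep (vc : Int) (buf : List Int) (faces : List (List Int)) (v : Int)
    (hs : ¬(v = -1 ∨ v ≥ vc)) :
    aStripStep vc (buf, faces) v = (buf ++ [v], faces ++ (emitRun 0 (buf ++ [v])).drop (emitRun 0 buf).length) := by
  by_cases h2 : 2 ≤ buf.length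
  · obtain ⟨l, a, b, rfl⟩ := exists_snoc2 h2
    have hcat : (l ++ [a, b]) ++ [v] = l ++ [a, b, v] := by simp
    have hsnoc := emitRun_snoc l a b v 0
    rw [hcat, hsnoc]
    simp only [aStripStep, hs, if_false]
    rw [hcat]
    simp only [pyGetD_snoc3_a, pyGetD_snoc3_b, pyGetD_snoc3_v]
    have hlen : (l ++ [a, b, v]).length ≥ 3 := by simp
    rw [if_pos hlen]
    have hidx : (l ++ [a, b, v]).length - 3 = l.length := by simp
    rw [List.drop_left]
    simp only [hidx, triAt, zero_add]
    by_cases hd : a ≠ b ∧ b ≠ v ∧ a ≠ v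
    · rw [if_pos hd, if_pos hd]
      by_cases hp : l.length % 2 = 0
      · rw [if_pos hp, if_pos hp]
      · rw [if_neg hp, if_neg hp]
    · rw [if_neg hd, if_neg hd]; simp
  · have hshort : emitRun 0 buf = [] := emitRun_short 0 buf (by omega)
    have hshort2 : emitRun 0 (buf ++ [v]) = [] := emitRun_short 0 _ (by simp; omega)
    rw [hshort, hshort2]
    simp only [aStripStep, hs, if_false, List.length_nil, List.drop_nil, List.append_nil]
    rw [if_neg (by simp; omega)]

-- loop invariant of A's strip loop against B's runs-then-emit pipeline
theorem strip_key (vc : Int) : ∀ (indices buf : List Int) (faces : List (List Int)),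
    (indices.foldl (aStripStep vc) (buf, faces)).2
      = faces ++ (((indices.foldl (bRunStep vc) [buf]).map (emitRun 0)).flatten).drop (emitRun 0 buf).length := by
  intro indices
  induction indices with
  | nil => intro buf faces; simp
  | cons v rest ih =>
    intro buf faces
    simp only [List.foldl_cons]
    by_cases hs : v = -1 ∨ v ≥ vc
    · rw [show aStripStep vc (buf, faces) v = ([], faces) by simp [aStripStep, hs],
        show bRunStep vc [buf] v = [buf] ++ [[]] by simp [bRunStep, hs],
        foldl_bRunStep_append vc rest [buf] [[]] (by simp), ih [] faces]
      rw [emitRun_short 0 [] (by simp)]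
      simp
    · rw [aStripStep_nonsep vc buf faces v hs,
        show bRunStep vc [buf] v = [buf ++ [v]] by simp [bRunStep, hs],
        ih (buf ++ [v]) _]
      obtain ⟨Y, hY⟩ := emit_prefix vc rest (buf ++ [v])
      obtain ⟨d, hd⟩ := emitRun_snoc_prefix buf v
      rw [hY, hd, List.drop_left, List.drop_left,
        show List.drop (emitRun 0 buf).length (emitRun 0 buf ++ d ++ Y) = d ++ Y from by
          rw [List.append_assoc]; exact List.drop_left]
      simp

theorem pyRange3_nil (a b : Int) (h : b ≤ a) : PySem.List.pyRange a b 3 = [] := by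
  rw [PySem.List.pyRange_of_pos a b (by omega)]
  rw [if_neg (by omega)]
  simp

theorem pyRange3_cons (a b : Int) (h : a < b) :
    PySem.List.pyRange a b 3 = a :: PySem.List.pyRange (a + 3) b 3 := by
  rw [PySem.List.pyRange_of_pos a b (by omega), PySem.List.pyRange_of_pos (a + 3) b (by omega)]
  rw [if_pos h]
  by_cases h3 : a + 3 < b
  · rw [if_pos h3]
    have hm : ((b - a + 3 - 1) / 3).toNat = ((b - (a + 3) + 3 - 1) / 3).toNat + 1 := by omega
    rw [hm, List.range_succ_eq_map]
    simp only [List.map_cons, List.map_map]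
    congr 1
    · omega
    · apply List.map_congr_left
      intro k _
      simp only [Function.comp_apply]
      push_cast
      ring
  · rw [if_neg h3]
    have hm : ((b - a + 3 - 1) / 3).toNat = 1 := by omega
    rw [hm]
    simp

theorem emitList_short (l : List Int) (h : l.length < 3) : emitList l = [] := by
  match l with
  | [] => rfl
  | [_] => rfl
  | [_, _] => rfl
  | _ :: _ :: _ :: _ => simp at h; omega

-- A's stride-3 index loop against B's 3-chunk consumption, with fuel m
theorem list_key (clean : List Int) : ∀ (m s : Nat) (faces : List (List Int)),
    clean.length - s ≤ m → s ≤ clean.length →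
    (PySem.List.pyRange (s : Int) ((clean.length : Int) - 2) 3).foldl
      (fun faces i =>
        if PySem.List.pyGetD clean i 0 ≠ PySem.List.pyGetD clean (i + 1) 0 ∧
            PySem.List.pyGetD clean (i + 1) 0 ≠ PySem.List.pyGetD clean (i + 2) 0 ∧
            PySem.List.pyGetD clean i 0 ≠ PySem.List.pyGetD clean (i + 2) 0 then
          faces ++ [[PySem.List.pyGetD clean i 0, PySem.List.pyGetD clean (i + 1) 0, PySem.List.pyGetD clean (i + 2) 0]]
        else faces)
      faces
    = faces ++ emitList (clean.drop s) := by
  intro m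
  induction m with
  | zero =>
    intro s faces hm hs
    have hεq : s = clean.length := by omega
    rw [pyRange3_nil _ _ (by omega), hεq]
    simp [emitList]
  | succ m ih =>
    intro s faces hm hs
    by_cases hlt : (s : Int) < (clean.length : Int) - 2
    · rw [pyRange3_cons _ _ hlt]
      simp only [List.foldl_cons]
      have h0 : s < clean.length := by omega
      have h1 : s + 1 < clean.length := by omega
      have h2 : s + 2 < clean.length := by omega
      have e0 : PySem.List.pyGetD clean (s : Int) 0 = clean[s] := by
        rw [PySem.List.pyGetD_natCast, List.getD_eq_getElem _ _ h0]
      have e1 : PySem.List.pyGetD clean ((s : Int) + 1) 0 = clean[s + 1] := by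
        rw [show ((s : Int) + 1) = ((s + 1 : Nat) : Int) by push_cast; ring,
          PySem.List.pyGetD_natCast, List.getD_eq_getElem _ _ h1]
      have e2 : PySem.List.pyGetD clean ((s : Int) + 2) 0 = clean[s + 2] := by
        rw [show ((s : Int) + 2) = ((s + 2 : Nat) : Int) by push_cast; ring,
          PySem.List.pyGetD_natCast, List.getD_eq_getElem _ _ h2]
      have hdrop : clean.drop s = clean[s] :: clean[s + 1] :: clean[s + 2] :: clean.drop (s + 3) := by
        rw [List.drop_eq_getElem_cons h0, List.drop_eq_getElem_cons h1, List.drop_eq_getElem_cons h2]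
      have hrec := ih (s + 3) (if clean[s] ≠ clean[s + 1] ∧ clean[s + 1] ≠ clean[s + 2] ∧ clean[s] ≠ clean[s + 2]
          then faces ++ [[clean[s], clean[s + 1], clean[s + 2]]] else faces) (by omega) (by omega)
      rw [show ((s : Int) + 3) = ((s + 3 : Nat) : Int) by push_cast; ring]
      simp only [e0, e1, e2]
      rw [hrec, hdrop]
      simp only [emitList]
      split_ifs with hd
      · simp
      · simp
    · rw [pyRange3_nil _ _ (by omega)]
      rw [emitList_short _ (by simp; omega)]
      simp

-- ===== VERDICT (by name: the statement is the Claim_ definition above) =====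
theorem decode_faces_spec : Claim_equal_decode_faces := by
  unfold Claim_equal_decode_faces
  intro indices vc is_strip _
  unfold Spec_decode_faces decode_faces decode_faces_alt
  cases is_strip
  · simp only [Bool.false_eq_true, if_false]
    have h := list_key (indices.filter (fun v => decide (0 ≤ v ∧ v < vc)))
      ((indices.filter (fun v => decide (0 ≤ v ∧ v < vc))).length) 0 [] (by omega) (by omega)
    simpa using h
  · simp only [if_true]
    rw [strip_key vc indices [] []]
    rw [emitRun_short 0 [] (by simp)]
    simp
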